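-- pv_equiv track=rewrite | github.com/Ylnaos/NewRAG | backed/app/eval/runner.py | _build_relevance
-- ===== SOURCE A (Python) =====
-- from typing import Any, Dict, List, Optional, Sequence, Tuple
--
-- def _build_relevance(
--     chunks: Sequence[Dict[str, Any]],
--     expected_evidence: Sequence[str],
-- ) -> List[int]:
--     relevance: List[int] = []
--     for item in chunks:
--         text = str(item.get("text", ""))
--         relevance.append(1 if _matches_any(text, expected_evidence) else 0)
--     return relevance
--
-- def _matches_any(text: str, expected_evidence: Sequence[str]) -> bool:
--     if not expected_evidence:
--         return False
--     normalized_text = _normalize(text)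
--     for expected in expected_evidence:
--         normalized_expected = _normalize(expected)
--         if normalized_expected and normalized_expected in normalized_text:
--             return True
--     return False
--
-- def _normalize(text: str) -> str:
--     return " ".join(text.lower().split())
-- ===== SOURCE B (Python) =====
-- def _build_relevance(chunks, expected_evidence):
--     # Pattern-major sweep: normalize each chunk text once into a list, then for
--     # each (once-normalized, non-empty) evidence pattern OR its matches into a
--     # flag vector; normalization is a single-pass whitespace-collapsing state
--     # machine instead of split+join.
--     texts = [_norm(str(item.get("text", ""))) for item in chunks]
--     flags = [False] * len(texts)
--     for pat in expected_evidence: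
--         p = _norm(pat)
--         if p:
--             flags = [f or (p in t) for f, t in zip(flags, texts)]
--     return [1 if f else 0 for f in flags]
--
-- def _norm(text):
--     out = []
--     for ch in text.lower():
--         if ch.isspace():
--             if out and out[-1] != " ":
--                 out.append(" ")
--         else:
--             out.append(ch)
--     if out and out[-1] == " ":
--         out.pop()
--     return "".join(out)
-- ===== Notes on version B (the rewrite author's own statement) =====
-- stated objective: faster
-- what changed: B transposes the loops: it normalizes the evidence patterns once and sweeps pattern-major, ORing each pattern's matches into a flag vector over the once-normalized chunk texts, and it normalizes by a single-pass whitespace-collapsing state machine instead of A's lower/split/join with every pattern re-normalized per chunk.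
import Mathlib
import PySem

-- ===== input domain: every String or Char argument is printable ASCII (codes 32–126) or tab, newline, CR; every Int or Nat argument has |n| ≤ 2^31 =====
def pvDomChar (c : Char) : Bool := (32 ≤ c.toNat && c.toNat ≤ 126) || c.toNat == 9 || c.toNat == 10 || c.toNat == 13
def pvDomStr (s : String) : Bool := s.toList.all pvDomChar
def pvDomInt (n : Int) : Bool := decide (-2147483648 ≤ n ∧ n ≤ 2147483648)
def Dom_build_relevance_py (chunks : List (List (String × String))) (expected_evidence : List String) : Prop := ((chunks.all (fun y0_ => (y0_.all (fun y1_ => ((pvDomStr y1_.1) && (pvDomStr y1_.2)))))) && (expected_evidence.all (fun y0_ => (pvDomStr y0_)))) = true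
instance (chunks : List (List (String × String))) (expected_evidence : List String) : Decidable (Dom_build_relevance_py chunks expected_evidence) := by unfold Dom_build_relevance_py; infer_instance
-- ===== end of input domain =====

-- B transposes the loops (a pattern-major sweep ORing each once-normalized pattern's
-- matches into a flag vector) and normalizes by a one-pass whitespace-collapsing
-- state machine instead of split+join (objective: faster, constant-factor: each string is normalized once).

-- ===== PORT A =====
-- _normalize(text) = " ".join(text.lower().split())
def pvNormA (text : String) : String :=
  PySem.Str.join " " (PySem.Str.split₀ (PySem.Str.lower text))

-- the 'for expected in expected_evidence' loop of _matches_any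
def pvMatchLoopA (normalized_text : String) : List String → Bool
  | [] => false
  | expected :: rest =>
    let normalized_expected := pvNormA expected
    if normalized_expected ≠ "" ∧ PySem.Str.isIn normalized_expected normalized_text = true
    then true
    else pvMatchLoopA normalized_text rest

def pvMatchesAny (text : String) (expected_evidence : List String) : Bool :=
  if expected_evidence = [] then false
  else pvMatchLoopA (pvNormA text) expected_evidence

def build_relevance_py (chunks : List (List (String × String))) (expected_evidence : List String) : List Int :=
  chunks.foldl
    (fun relevance item =>
      let text := PySem.Dict.getD (PySem.Dict.mk item) "text" ""
      relevance ++ [if pvMatchesAny text expected_evidence then (1 : Int) else 0])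
    []

-- ===== PORT B =====
-- one step of _norm's loop over the characters of text.lower()
def pvStepB (out : List Char) (ch : Char) : List Char :=
  if PySem.Chars.isspace ch then
    (if out ≠ [] ∧ out.getLast? ≠ some ' ' then out ++ [' '] else out)
  else out ++ [ch]

-- _norm(text): single-pass whitespace-collapsing state machine, then drop a trailing blank
def pvNormB (text : String) : String :=
  let out := (PySem.Str.lower text).toList.foldl pvStepB []
  String.ofList (if out.getLast? = some ' ' then out.dropLast else out)

def build_relevance_py_alt (chunks : List (List (String × String))) (expected_evidence : List String) : List Int :=
  let texts := chunks.map (fun item => pvNormB (PySem.Dict.getD (PySem.Dict.mk item) "text" ""))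
  let flags := expected_evidence.foldl
    (fun flags pat =>
      let p := pvNormB pat
      if p ≠ "" then (flags.zip texts).map (fun ft => ft.1 || PySem.Str.isIn p ft.2) else flags)
    (List.replicate texts.length false)
  flags.map (fun f => if f then (1 : Int) else 0)

-- ===== PRECONDITION & SPEC =====
def Spec_build_relevance_py (chunks : List (List (String × String))) (expected_evidence : List String) (out : List Int) : Prop := out = build_relevance_py_alt chunks expected_evidence
instance (chunks : List (List (String × String))) (expected_evidence : List String) (out : List Int) : Decidable (Spec_build_relevance_py chunks expected_evidence out) := by unfold Spec_build_relevance_py; infer_instance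

-- ===== CLAIM (what is proved, stated in full; the proofs are below) =====
def Claim_equal_build_relevance_py : Prop := ∀ (chunks : List (List (String × String))) (expected_evidence : List String), Dom_build_relevance_py chunks expected_evidence → Spec_build_relevance_py chunks expected_evidence (build_relevance_py chunks expected_evidence)

-- ===== LEMMAS AND PROOFS =====

-- appending one word to a ' '-join
theorem join_append_word (l : List (List Char)) (w : List Char) :
    PySem.Chars.join [' '] (l ++ [w])
      = PySem.Chars.join [' '] l ++ (if l = [] then [] else [' ']) ++ w := by
  induction l with
  | nil => simp [PySem.Chars.join, List.intercalate]
  | cons x t ih =>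
    cases t with
    | nil => simp [PySem.Chars.join, List.intercalate]
    | cons y u =>
      simp only [List.cons_append, PySem.Chars.join, List.intercalate] at *
      simp [List.intersperse] at *
      simp [ih]

def pvTrim (out : List Char) : List Char :=
  if out.getLast? = some ' ' then out.dropLast else out

-- the state machine agrees with split₀-then-join, generalized over the loop states
theorem normB_gen (cs : List Char) (cur : List Char) (acc : List (List Char)) (out : List Char)
    (hcur : ∀ c ∈ cur, PySem.Chars.isspace c = false)
    (hinv :
      (cur = [] ∧ acc = [] ∧ out = []) ∨
      (cur = [] ∧ acc ≠ [] ∧ out = PySem.Chars.join [' '] acc.reverse ++ [' ']) ∨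
      (cur ≠ [] ∧ out = PySem.Chars.join [' '] (acc.reverse ++ [cur.reverse]) ∧
        out.getLast? ≠ some ' ' ∧ out ≠ [])) :
    pvTrim (cs.foldl pvStepB out)
      = PySem.Chars.join [' '] (PySem.Chars.split₀.go cs cur acc) := by
  induction cs generalizing cur acc out with
  | nil =>
    simp only [List.foldl_nil, PySem.Chars.split₀.go]
    rcases hinv with ⟨h1, h2, h3⟩ | ⟨h1, h2, h3⟩ | ⟨h1, h2, h3, h4⟩
    · simp [h1, h2, h3, pvTrim, PySem.Chars.join, List.intercalate]
    · simp only [h1, List.isEmpty_nil, pvTrim, h3]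
      simp
    · rw [if_neg (by simpa using h1), pvTrim, if_neg h3]
      simpa using h2
  | cons c rest ih =>
    simp only [List.foldl_cons, PySem.Chars.split₀.go]
    by_cases hs : PySem.Chars.isspace c = true
    · rw [if_pos hs]
      rcases hinv with ⟨h1, h2, h3⟩ | ⟨h1, h2, h3⟩ | ⟨h1, h2, h3, h4⟩
      · subst h1; subst h2; subst h3
        rw [if_pos (by simp)]
        rw [show pvStepB [] c = [] by simp [pvStepB, hs]]
        exact ih [] [] [] (by simp) (Or.inl ⟨rfl, rfl, rfl⟩)
      · subst h1
        rw [if_pos (by simp)]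
        have : pvStepB out c = out := by
          simp [pvStepB, hs, h3]
        rw [this]
        exact ih [] acc out (by simp) (Or.inr (Or.inl ⟨rfl, h2, h3⟩))
      · rw [if_neg (by simpa using h1)]
        have : pvStepB out c = out ++ [' '] := by
          simp [pvStepB, hs, h4, h3]
        rw [this]
        refine ih [] (cur.reverse :: acc) (out ++ [' ']) (by simp) (Or.inr (Or.inl ⟨rfl, by simp, ?_⟩))
        rw [h2]; simp
    · simp only [Bool.not_eq_true] at hs
      rw [if_neg (by simp [hs])]
      have hcsp : c ≠ ' ' := by
        intro h; rw [h] at hs; simp [PySem.Chars.isspace] at hs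
      have hstep : pvStepB out c = out ++ [c] := by simp [pvStepB, hs]
      rw [hstep]
      have hcur' : ∀ x ∈ c :: cur, PySem.Chars.isspace x = false := by
        intro x hx; rcases hx with _ | hx
        · exact hs
        · exact hcur x (by assumption)
      refine ih (c :: cur) acc (out ++ [c]) hcur' (Or.inr (Or.inr ⟨by simp, ?_, by simp [hcsp], by simp⟩))
      rcases hinv with ⟨h1, h2, h3⟩ | ⟨h1, h2, h3⟩ | ⟨h1, h2, h3, h4⟩
      · subst h1; subst h2; subst h3
        simp [PySem.Chars.join, List.intercalate]
      · subst h1; rw [h3]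
        rw [join_append_word]
        have : acc.reverse ≠ [] := by simpa using h2
        simp [this]
      · rw [h2]
        have : (c :: cur).reverse = cur.reverse ++ [c] := by simp
        rw [this, join_append_word, join_append_word]
        simp [List.append_assoc]

-- the two normalizers agree
theorem normB_eq_normA (text : String) : pvNormB text = pvNormA text := by
  have h := normB_gen (PySem.Str.lower text).toList [] [] []
    (by simp) (Or.inl ⟨rfl, rfl, rfl⟩)
  unfold pvNormB
  unfold pvTrim at h
  unfold pvNormA
  simp only [PySem.Str.join, PySem.Str.split₀, PySem.Chars.split₀, List.map_map]
  congr 1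
  rw [show (String.toList ∘ String.ofList) = id from funext (fun l => by simp), List.map_id]
  exact h

-- A's inner loop is an 'any' over the once-normalized nonempty patterns
theorem matchLoop_eq_any (nt : String) (ev : List String) :
    pvMatchLoopA nt ev
      = ((ev.map pvNormB).filter (fun p => p ≠ "")).any (fun p => PySem.Str.isIn p nt) := by
  induction ev with
  | nil => rfl
  | cons e rest ih =>
    show (if pvNormA e ≠ "" ∧ PySem.Str.isIn (pvNormA e) nt = true then true
          else pvMatchLoopA nt rest) = _
    simp only [List.map_cons, List.filter_cons, normB_eq_normA]
    by_cases h : pvNormA e = ""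
    · simp [h, ih]
    · by_cases h2 : PySem.Str.isIn (pvNormA e) nt = true
      · simp [h, ih]
      · simp only [Bool.not_eq_true] at h2
        simp [h, ih]

theorem matchesAny_eq_any (text : String) (ev : List String) :
    pvMatchesAny text ev
      = ((ev.map pvNormB).filter (fun p => p ≠ "")).any
          (fun p => PySem.Str.isIn p (pvNormB text)) := by
  unfold pvMatchesAny
  rcases ev with _ | ⟨e, rest⟩
  · rfl
  · rw [if_neg (by simp), matchLoop_eq_any, normB_eq_normA]

-- B's pattern-major fold computes pointwise 'any' over the flag vector
theorem flags_fold (ev : List String) (texts : List String) (g : String → Bool) :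
    ev.foldl
      (fun flags pat =>
        let p := pvNormB pat
        if p ≠ "" then (flags.zip texts).map (fun ft => ft.1 || PySem.Str.isIn p ft.2) else flags)
      (texts.map g)
    = texts.map (fun t =>
        g t || ((ev.map pvNormB).filter (fun p => p ≠ "")).any (fun p => PySem.Str.isIn p t)) := by
  induction ev generalizing g with
  | nil => simp
  | cons e rest ih =>
    simp only [List.foldl_cons, List.map_cons, List.filter_cons]
    by_cases h : pvNormB e = ""
    · rw [if_neg (by simp [h])]
      rw [ih g]
      simp [h]
    · rw [if_pos (by simp [h])]
      have hz : (texts.map g).zip texts = texts.map (fun t => (g t, t)) := by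
        have := List.zip_map' (f := g) (g := id) (l := texts)
        simpa using this
      rw [hz, List.map_map]
      have hc : ((fun ft : Bool × String => ft.1 || PySem.Str.isIn (pvNormB e) ft.2) ∘ fun t => (g t, t))
           = fun t => g t || PySem.Str.isIn (pvNormB e) t := rfl
      rw [hc, ih (fun t => g t || PySem.Str.isIn (pvNormB e) t)]
      simp [h, Bool.or_assoc]

-- ===== VERDICT (by name: the statement is the Claim_ definition above) =====
theorem build_relevance_py_spec : Claim_equal_build_relevance_py := by
  intro chunks ev _
  show build_relevance_py chunks ev = build_relevance_py_alt chunks ev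
  unfold build_relevance_py build_relevance_py_alt
  rw [PySem.List.foldl_append_singleton_eq_map]
  simp only [List.length_map]
  rw [show (List.replicate chunks.length false)
        = (chunks.map (fun item => pvNormB (PySem.Dict.getD (PySem.Dict.mk item) "text" ""))).map
            (fun _ => false) by simp]
  rw [flags_fold]
  rw [List.map_map, List.map_map]
  apply List.map_congr_left
  intro item _
  simp only [Function.comp]
  rw [matchesAny_eq_any]
  simp
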